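-- pv_equiv track=rewrite | github.com/Rukshani/FYP | heuristicCalculation.py | heuristic_cal
-- ===== SOURCE A (Python) =====
-- def heuristic_cal(grid):
--     rows = len(grid)
--     columns = len(grid[0])
--     # print "rows, columns"
--     # print rows, columns
--     row_columns = rows + columns
--
--     list = []
--     for i in range(row_columns):
--         list.append(i)
--     # list.pop()
--     list.pop()
--     list.reverse()
--     # print list
--     heuristic=[]
--     for k in range(rows):
--         # print list[k:k+columns]
--         heuristic.append(list[k:k+columns])
--
--     # print "-------heuristic-----"
--     # # print heuristic
--     # for kr in range(len(heuristic)):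
--     #     print heuristic[kr]
--     return heuristic
-- ===== SOURCE B (Python) =====
-- def heuristic_cal(grid):
--     rows = len(grid)
--     columns = len(grid[0])
--     return [[(rows - 1 - k) + (columns - 1 - j) for j in range(columns)]
--             for k in range(rows)]
-- ===== Notes on version B (the rewrite author's own statement) =====
-- stated objective: simpler
-- what changed: B computes each cell directly from the closed form (rows-1-k)+(columns-1-j) in a nested comprehension, instead of building a reversed 1-D range list by repeated append/pop/reverse and slicing overlapping windows out of it.
import Mathlib
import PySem

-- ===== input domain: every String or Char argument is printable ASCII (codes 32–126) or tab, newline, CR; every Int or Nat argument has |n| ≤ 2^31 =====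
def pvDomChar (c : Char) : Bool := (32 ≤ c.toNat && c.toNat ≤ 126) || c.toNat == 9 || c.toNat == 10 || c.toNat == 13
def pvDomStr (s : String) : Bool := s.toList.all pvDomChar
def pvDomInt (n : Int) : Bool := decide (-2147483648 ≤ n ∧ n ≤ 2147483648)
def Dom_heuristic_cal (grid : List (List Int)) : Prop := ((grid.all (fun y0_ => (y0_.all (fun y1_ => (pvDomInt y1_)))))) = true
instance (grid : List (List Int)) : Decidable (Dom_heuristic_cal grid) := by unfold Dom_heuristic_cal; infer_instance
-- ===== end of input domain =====

-- B replaces A's build-range/pop/reverse/slice-windows construction by the closed form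
-- (rows-1-k)+(columns-1-j) computed cell by cell; objective: simpler.

-- ===== PORT A =====
def heuristic_cal (grid : List (List Int)) : List (List Int) :=
  let rows := grid.length
  let columns := (grid.headD []).length   -- len(grid[0]); Pre_ excludes grid = [] (IndexError)
  let row_columns := rows + columns
  -- list = []; for i in range(row_columns): list.append(i)
  let l := (PySem.List.pyRange 0 (row_columns : Int) 1).foldl (fun acc i => acc ++ [i]) []
  -- list.pop()  (pops the last element; the list is nonempty whenever grid is, per Pre_)
  let l := l.dropLast
  -- list.reverse()
  let l := l.reverse
  -- for k in range(rows): heuristic.append(list[k:k+columns])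
  (List.range rows).foldl
    (fun (hAcc : List (List Int)) (k : Nat) => hAcc ++ [PySem.List.slice l (some (k : Int)) (some ((k : Int) + (columns : Int)))]) []

-- ===== PORT B =====
def heuristic_cal_alt (grid : List (List Int)) : List (List Int) :=
  let rows := grid.length
  let columns := (grid.headD []).length   -- len(grid[0]); Pre_ excludes grid = []
  (List.range rows).map (fun (k : Nat) =>
    (List.range columns).map (fun (j : Nat) =>
      ((rows : Int) - 1 - (k : Int)) + ((columns : Int) - 1 - (j : Int))))

-- ===== PRECONDITION & SPEC =====
-- Pre_ excludes the empty grid, on which both Pythons raise IndexError at grid[0].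
def Pre_heuristic_cal (grid : List (List Int)) : Prop := grid ≠ []
instance (grid : List (List Int)) : Decidable (Pre_heuristic_cal grid) := by unfold Pre_heuristic_cal; infer_instance
def pvWitness_heuristic_cal : List (List Int) := [[0, 0], [0, 0], [0, 0]]

def Spec_heuristic_cal (grid : List (List Int)) (out : List (List Int)) : Prop := out = heuristic_cal_alt grid
instance (grid : List (List Int)) (out : List (List Int)) : Decidable (Spec_heuristic_cal grid out) := by unfold Spec_heuristic_cal; infer_instance

-- ===== CLAIM (what is proved, stated in full; the proofs are below) =====
def Claim_equal_heuristic_cal : Prop := ∀ (grid : List (List Int)), Dom_heuristic_cal grid → Pre_heuristic_cal grid → Spec_heuristic_cal grid (heuristic_cal grid)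

-- ===== LEMMAS AND PROOFS =====

-- The reversed, popped range list of A, characterised elementwise.
lemma pv_row_eq (r c k : Nat) (hk : k < r) :
    PySem.List.slice
      ((((PySem.List.pyRange 0 ((r + c : Nat) : Int) 1).foldl (fun acc i => acc ++ [i]) []).dropLast).reverse)
      (some (k : Int)) (some ((k : Int) + (c : Int)))
    = (List.range c).map (fun (j : Nat) => ((r : Int) - 1 - (k : Int)) + ((c : Int) - 1 - (j : Int))) := by
  rw [PySem.List.foldl_append_singleton]
  rw [PySem.List.slice_natCast_add]
  rw [PySem.List.pyRange_one]
  simp only [List.nil_append, sub_zero, Int.toNat_natCast, zero_add]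
  apply List.ext_getElem
  · simp
    omega
  · intro j h1 h2
    simp only [List.length_take, List.length_drop, List.length_reverse, List.length_dropLast,
      List.length_map, List.length_range] at h1 h2
    simp [List.getElem_take, List.getElem_drop, List.getElem_reverse, List.getElem_dropLast,
      List.getElem_map, List.getElem_range]
    omega

theorem pv_main (grid : List (List Int)) (h : grid ≠ []) :
    heuristic_cal grid = heuristic_cal_alt grid := by
  unfold heuristic_cal heuristic_cal_alt
  simp only
  rw [PySem.List.foldl_append_singleton_eq_map]
  simp only [List.nil_append]
  apply List.map_congr_left
  intro k hk
  exact pv_row_eq grid.length (grid.headD []).length k (List.mem_range.mp hk)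

-- ===== VERDICT (by name: the statement is the Claim_ definition above) =====
theorem heuristic_cal_spec : Claim_equal_heuristic_cal := by
  intro grid _ hpre
  exact pv_main grid hpre
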